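-- pv_equiv track=rewrite | github.com/PonchoCeniceros/competitive_programming_solutions | exercises/1464_maximum_product.py | maxProduct
-- ===== SOURCE A (Python) =====
-- from typing import List
--
-- def maxProduct(nums: List[int]) -> int:
--     u, iu, v = -1, -1, -1
--
--     for i, n in enumerate(nums):
--         if n > u:
--             u, iu = n, i
--
--     for i, n in enumerate(nums):
--         if iu != i:
--             if n > v:
--                 v = n
--
--     return (u - 1) * (v - 1)
-- ===== SOURCE B (Python) =====
-- from typing import List
--
-- def maxProduct(nums: List[int]) -> int:
--     # one pass keeping the two largest values seen (both seeded with A's -1 sentinel)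
--     a, b = -1, -1
--     for n in nums:
--         if n > a:
--             a, b = n, a
--         elif n > b:
--             b = n
--     return (a - 1) * (b - 1)
-- ===== Notes on version B (the rewrite author's own statement) =====
-- stated objective: alternative
-- what changed: Replaced A's two passes (find max + its index, then rescan skipping that index) by a single pass maintaining the running top-two values, both seeded with A's -1 sentinel.
import Mathlib
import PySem

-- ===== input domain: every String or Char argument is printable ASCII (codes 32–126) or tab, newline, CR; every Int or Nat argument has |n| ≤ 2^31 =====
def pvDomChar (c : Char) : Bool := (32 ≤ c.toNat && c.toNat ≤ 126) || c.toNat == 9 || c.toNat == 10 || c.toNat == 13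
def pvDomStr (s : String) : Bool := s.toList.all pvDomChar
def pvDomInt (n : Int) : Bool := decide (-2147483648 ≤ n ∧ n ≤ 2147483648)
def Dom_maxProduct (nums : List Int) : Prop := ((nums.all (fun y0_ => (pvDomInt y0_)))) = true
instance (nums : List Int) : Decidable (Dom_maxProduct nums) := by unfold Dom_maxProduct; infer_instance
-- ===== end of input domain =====

-- B replaces A's two passes (max + its index, then rescan skipping it) by one pass tracking the two largest values.

-- ===== PORT A =====
-- first loop: running (u, iu) over enumerate(nums)
def aLoop1 (xs : List (Int × Int)) (s : Int × Int) : Int × Int :=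
  xs.foldl (fun p q => if q.2 > p.1 then (q.2, q.1) else p) s

-- second loop: running v over enumerate(nums), skipping index iu
def aLoop2 (iu : Int) (xs : List (Int × Int)) (v : Int) : Int :=
  xs.foldl (fun v q => if iu ≠ q.1 then (if q.2 > v then q.2 else v) else v) v

def maxProduct (nums : List Int) : Int :=
  let e := PySem.List.enumerate nums 0
  let s := aLoop1 e (-1, -1)
  let v := aLoop2 s.2 e (-1)
  (s.1 - 1) * (v - 1)

-- ===== PORT B =====
-- one pass: (a, b) = two largest so far, seeded (-1, -1)
def bLoop (xs : List Int) (s : Int × Int) : Int × Int :=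
  xs.foldl (fun p n => if n > p.1 then (n, p.1) else if n > p.2 then (p.1, n) else p) s

def maxProduct_alt (nums : List Int) : Int :=
  let s := bLoop nums (-1, -1)
  (s.1 - 1) * (s.2 - 1)

-- ===== PRECONDITION & SPEC =====
def Spec_maxProduct (nums : List Int) (out : Int) : Prop := out = maxProduct_alt nums
instance (nums : List Int) (out : Int) : Decidable (Spec_maxProduct nums out) := by unfold Spec_maxProduct; infer_instance

-- ===== CLAIM (what is proved, stated in full; the proofs are below) =====
def Claim_equal_maxProduct : Prop := ∀ (nums : List Int), Dom_maxProduct nums → Spec_maxProduct nums (maxProduct nums)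

-- ===== LEMMAS AND PROOFS =====

-- plain running-max fold (proof-side reference)
def maxFold (xs : List (Int × Int)) (v : Int) : Int :=
  xs.foldl (fun v q => if q.2 > v then q.2 else v) v

theorem aLoop1_append (xs : List (Int × Int)) (q : Int × Int) (s : Int × Int) :
    aLoop1 (xs ++ [q]) s = (if q.2 > (aLoop1 xs s).1 then (q.2, q.1) else aLoop1 xs s) := by
  simp [aLoop1, List.foldl_append]

theorem aLoop2_append (iu : Int) (xs : List (Int × Int)) (q : Int × Int) (v : Int) :
    aLoop2 iu (xs ++ [q]) v
      = (if iu ≠ q.1 then (if q.2 > aLoop2 iu xs v then q.2 else aLoop2 iu xs v)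
         else aLoop2 iu xs v) := by
  simp [aLoop2, List.foldl_append]

theorem bLoop_append (xs : List Int) (n : Int) (s : Int × Int) :
    bLoop (xs ++ [n]) s
      = (if n > (bLoop xs s).1 then (n, (bLoop xs s).1)
         else if n > (bLoop xs s).2 then ((bLoop xs s).1, n) else bLoop xs s) := by
  simp [bLoop, List.foldl_append]

theorem aLoop1_fst (xs : List (Int × Int)) (s : Int × Int) :
    (aLoop1 xs s).1 = maxFold xs s.1 := by
  induction xs generalizing s with
  | nil => rfl
  | cons q xs ih =>
    simp only [aLoop1, maxFold, List.foldl] at *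
    by_cases h : q.2 > s.1 <;> simp [h, ih]

theorem aLoop2_skip_none (iu : Int) (xs : List (Int × Int)) (v : Int)
    (h : ∀ q ∈ xs, iu ≠ q.1) : aLoop2 iu xs v = maxFold xs v := by
  induction xs generalizing v with
  | nil => rfl
  | cons q xs ih =>
    simp only [aLoop2, maxFold, List.foldl] at *
    rw [if_pos (h q (by simp))]
    exact ih _ (fun q hq => h q (by simp [hq]))

theorem enumerate_fst_lt (nums : List Int) (q : Int × Int)
    (h : q ∈ PySem.List.enumerate nums 0) : 0 ≤ q.1 ∧ q.1 < (nums.length : Int) := by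
  rcases (PySem.List.mem_enumerate_iff nums 0 q).1 h with ⟨k, hk, rfl⟩
  constructor <;> simp <;> exact hk

theorem main_inv (nums : List Int) :
    (aLoop1 (PySem.List.enumerate nums 0) (-1, -1)).1 = (bLoop nums (-1, -1)).1 ∧
    aLoop2 (aLoop1 (PySem.List.enumerate nums 0) (-1, -1)).2 (PySem.List.enumerate nums 0) (-1)
      = (bLoop nums (-1, -1)).2 ∧
    ((aLoop1 (PySem.List.enumerate nums 0) (-1, -1)).2 = -1 ∨
      (0 ≤ (aLoop1 (PySem.List.enumerate nums 0) (-1, -1)).2 ∧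
       (aLoop1 (PySem.List.enumerate nums 0) (-1, -1)).2 < (nums.length : Int))) := by
  induction nums using List.reverseRecOn with
  | nil => exact ⟨rfl, rfl, Or.inl rfl⟩
  | append_singleton xs n ih =>
    obtain ⟨ih1, ih2, ih3⟩ := ih
    have henum : PySem.List.enumerate (xs ++ [n]) 0
        = PySem.List.enumerate xs 0 ++ [((xs.length : Int), n)] := by
      rw [PySem.List.enumerate_append]
      simp [PySem.List.enumerate_cons, PySem.List.enumerate_nil]
    set e := PySem.List.enumerate xs 0 with he
    set s := aLoop1 e (-1, -1) with hs
    set t := bLoop xs (-1, -1) with ht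
    have hL : ∀ q ∈ e, ((xs.length : Int)) ≠ q.1 := by
      intro q hq
      have := enumerate_fst_lt xs q (he ▸ hq)
      omega
    have hstep1 : aLoop1 (PySem.List.enumerate (xs ++ [n]) 0) (-1, -1)
        = (if n > s.1 then ((n : Int), (xs.length : Int)) else s) := by
      rw [henum, aLoop1_append, ← hs]
    have hlen : ((xs ++ [n]).length : Int) = (xs.length : Int) + 1 := by simp
    by_cases hn : n > s.1
    · -- new maximum: index becomes xs.length; second loop over xs skips nothing
      have hs2 : aLoop2 (xs.length : Int) e (-1) = s.1 := by
        rw [aLoop2_skip_none _ _ _ hL, hs, aLoop1_fst]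
      refine ⟨?_, ?_, ?_⟩
      · rw [hstep1, bLoop_append, ← ht, if_pos hn, if_pos (ih1 ▸ hn)]
      · rw [hstep1, bLoop_append, ← ht, if_pos hn, if_pos (ih1 ▸ hn), henum,
          aLoop2_append]
        rw [if_neg (by simp), hs2, ih1]
      · rw [hstep1, if_pos hn]; right; constructor
        · simp
        · rw [hlen]; omega
    · -- no new maximum: index unchanged; both second slots take the same step
      refine ⟨?_, ?_, ?_⟩
      · rw [hstep1, bLoop_append, ← ht, if_neg hn, if_neg (ih1 ▸ hn)]
        by_cases h2 : n > t.2 <;> simp [h2, ih1]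
      · rw [hstep1, bLoop_append, ← ht, if_neg hn, if_neg (ih1 ▸ hn), henum,
          aLoop2_append]
        have hne : s.2 ≠ (xs.length : Int) := by rcases ih3 with h | h <;> omega
        rw [if_pos hne, ih2]
        by_cases h2 : n > t.2 <;> simp [h2]
      · rw [hstep1, if_neg hn, hlen]
        rcases ih3 with h | h
        · exact Or.inl h
        · exact Or.inr ⟨h.1, by omega⟩

-- ===== VERDICT (by name: the statement is the Claim_ definition above) =====
theorem maxProduct_spec : Claim_equal_maxProduct := by
  intro nums _
  obtain ⟨h1, h2, _⟩ := main_inv nums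
  simp only [Spec_maxProduct, maxProduct, maxProduct_alt, h1, h2]
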